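-- pv_equiv track=rewrite | github.com/maurimorero/untitled | 3.py | NumMasPopular
-- ===== SOURCE A (Python) =====
-- def NumMasPopular(S, cantidad):
--     if len(S)>5000: # si el array tiene mas de 5000 elementos, devuelvo 0
--         return 0
--     cantidades= []
--     for val in S:
--         cantidades.append(S.count(val)) # mete todos las cantidades de cada elemento a un array
--
--     maximaCant= max(cantidades)  # busca la cantidad máxima
--     valores=[]
--
--     for ind, valor in enumerate(cantidades):
--         if(valor==maximaCant):
--             valores.append(S[ind]) # agrega a un array auxiliar los valores de todos los máximos
--
--     return min(valores) # retorna el menor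
-- ===== SOURCE B (Python) =====
-- def NumMasPopular(S, cantidad):
--     if len(S) > 5000:  # keep the original guard
--         return 0
--     counts = {}
--     for x in S:
--         counts[x] = counts.get(x, 0) + 1
--     best_c = 0
--     best_v = 0
--     for v, c in counts.items():
--         if best_c < c or (c == best_c and v < best_v):
--             best_c, best_v = c, v
--     return best_v
-- ===== Notes on version B (the rewrite author's own statement) =====
-- stated objective: alternative
-- what changed: Replaces the quadratic S.count-per-element pass plus two auxiliary lists with one dict counting pass and a single best-(count,value) selection scan over the distinct values.
import Mathlib
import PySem

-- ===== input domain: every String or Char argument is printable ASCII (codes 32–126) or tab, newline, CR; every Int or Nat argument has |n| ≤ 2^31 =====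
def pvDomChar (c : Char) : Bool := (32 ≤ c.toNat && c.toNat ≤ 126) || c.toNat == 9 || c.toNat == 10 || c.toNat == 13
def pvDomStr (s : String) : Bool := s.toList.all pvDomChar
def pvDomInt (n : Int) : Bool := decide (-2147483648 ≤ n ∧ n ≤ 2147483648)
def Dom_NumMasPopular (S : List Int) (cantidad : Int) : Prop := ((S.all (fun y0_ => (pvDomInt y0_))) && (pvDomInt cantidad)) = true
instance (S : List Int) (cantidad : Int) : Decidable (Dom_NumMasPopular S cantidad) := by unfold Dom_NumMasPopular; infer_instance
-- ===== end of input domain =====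

-- B replaces A's per-element S.count pass and two auxiliary lists with one dict counting
-- pass and a single best-(count,value) scan over the distinct values (objective: alternative).

-- ===== PORT A =====
def NumMasPopular (S : List Int) (cantidad : Int) : Int :=
  if S.length > 5000 then 0
  else
    let cantidades : List Int :=
      S.foldl (fun acc val => acc ++ [(PySem.List.count S val : Int)]) []
    match PySem.List.max? cantidades (fun x => x) with
    | none => 0  -- unreachable under Pre_ (S ≠ []): Python's max([]) raises ValueError here
    | some maximaCant =>
      let valores : List Int :=
        (PySem.List.enumerate cantidades 0).foldl
          (fun acc p => if p.2 == maximaCant then acc ++ [PySem.List.pyGetD S p.1 0] else acc) []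
      match PySem.List.min? valores (fun x => x) with
      | none => 0  -- unreachable: valores is nonempty whenever cantidades is
      | some m => m

-- ===== PORT B =====
def NumMasPopular_alt (S : List Int) (cantidad : Int) : Int :=
  if S.length > 5000 then 0
  else
    let counts : PySem.Dict Int Int :=
      S.foldl (fun d x => d.insert x (d.getD x 0 + 1)) PySem.Dict.empty
    let r : Int × Int :=
      counts.items.foldl
        (fun b vc => if b.1 < vc.2 || (vc.2 == b.1 && vc.1 < b.2) then (vc.2, vc.1) else b)
        (0, 0)
    r.2

-- ===== PRECONDITION & SPEC =====
-- Pre_ excludes only the empty list, on which Python A raises ValueError (max of empty list).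
def Pre_NumMasPopular (S : List Int) (cantidad : Int) : Prop := S ≠ []
instance (S : List Int) (cantidad : Int) : Decidable (Pre_NumMasPopular S cantidad) := by
  unfold Pre_NumMasPopular; infer_instance

def pvWitness_NumMasPopular : List Int × Int := ([1, 2, 2, 3], 0)

def Spec_NumMasPopular (S : List Int) (cantidad : Int) (out : Int) : Prop :=
  out = NumMasPopular_alt S cantidad
instance (S : List Int) (cantidad : Int) (out : Int) : Decidable (Spec_NumMasPopular S cantidad out) := by
  unfold Spec_NumMasPopular; infer_instance

-- ===== CLAIM (what is proved, stated in full; the proofs are below) =====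
def Claim_equal_NumMasPopular : Prop := ∀ (S : List Int) (cantidad : Int), Dom_NumMasPopular S cantidad → Pre_NumMasPopular S cantidad → Spec_NumMasPopular S cantidad (NumMasPopular S cantidad)

-- ===== LEMMAS AND PROOFS =====

-- "(c₁,v₁) is at most as good as (c₂,v₂)": smaller count, or same count and not-smaller value.
def pvLe (a b : Int × Int) : Prop := a.1 < b.1 ∨ (a.1 = b.1 ∧ b.2 ≤ a.2)

def pvStep (b vc : Int × Int) : Int × Int :=
  if b.1 < vc.2 || (vc.2 == b.1 && vc.1 < b.2) then (vc.2, vc.1) else b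

theorem pvLe_trans {a b c : Int × Int} (h1 : pvLe a b) (h2 : pvLe b c) : pvLe a c := by
  unfold pvLe at *; omega

theorem pvLe_step_left (b q : Int × Int) : pvLe b (pvStep b q) := by
  unfold pvStep
  split
  · rename_i h; simp at h; unfold pvLe; dsimp only; omega
  · unfold pvLe; omega

theorem pvLe_step_right (b q : Int × Int) : pvLe (q.2, q.1) (pvStep b q) := by
  unfold pvStep
  split
  · unfold pvLe; dsimp only; omega
  · rename_i h; simp at h; unfold pvLe; dsimp only; omega

theorem pvFoldBest (L : List (Int × Int)) : ∀ (b : Int × Int),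
    (L.foldl pvStep b = b ∨ L.foldl pvStep b ∈ L.map (fun p => (p.2, p.1))) ∧
    pvLe b (L.foldl pvStep b) ∧
    ∀ p ∈ L, pvLe (p.2, p.1) (L.foldl pvStep b) := by
  induction L with
  | nil =>
    intro b
    refine ⟨Or.inl rfl, ?_, by simp⟩
    show pvLe b b
    unfold pvLe; omega
  | cons q L ih =>
    intro b
    obtain ⟨h1, h2, h3⟩ := ih (pvStep b q)
    refine ⟨?_, pvLe_trans (pvLe_step_left b q) h2, ?_⟩
    · rcases h1 with h1 | h1
      · rw [List.foldl_cons, h1]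
        unfold pvStep
        split
        · right; simp
        · left; rfl
      · right; rw [List.foldl_cons]; simp only [List.map_cons, List.mem_cons]; right; exact h1
    · intro p hp
      rcases List.mem_cons.mp hp with rfl | hp
      · exact pvLe_trans (pvLe_step_right b p) h2
      · exact h3 p hp

theorem pvEnumFilter (f : Int → Int) (M : Int) (T : List Int) :
    ∀ (S : List Int) (s : Int),
    (∀ k : Nat, k < S.length → PySem.List.pyGetD T (s + k) 0 = S.getD k 0) →
    ((PySem.List.enumerate (S.map f) s).filter (fun p => p.2 == M)).map
        (fun p => PySem.List.pyGetD T p.1 0)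
      = S.filter (fun x => f x == M) := by
  intro S
  induction S with
  | nil => intro s _; simp [PySem.List.enumerate_nil]
  | cons x S ih =>
    intro s h
    have hx : PySem.List.pyGetD T s 0 = x := by
      have := h 0 (by simp)
      simpa using this
    have htail := ih (s + 1) (fun k hk => by
      have := h (k + 1) (by simpa using Nat.succ_lt_succ hk)
      push_cast at this ⊢
      rw [show s + 1 + (k : Int) = s + ((k : Int) + 1) by ring]
      simpa using this)
    simp only [List.map_cons, PySem.List.enumerate_cons]
    by_cases hfx : (f x == M) = true
    · simp only [List.filter_cons, if_pos hfx, List.map_cons, hx, htail]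
    · simp only [List.filter_cons, if_neg hfx, htail]

theorem NumMasPopular_main (S : List Int) (cantidad : Int) (hne : S ≠ []) :
    NumMasPopular S cantidad = NumMasPopular_alt S cantidad := by
  by_cases h5 : S.length > 5000
  · simp [NumMasPopular, NumMasPopular_alt, h5]
  · -- abbreviations
    set f : Int → Int := fun v => (PySem.List.count S v : Int) with hf
    -- A side: cantidades = S.map f
    have hcant : S.foldl (fun acc val => acc ++ [(PySem.List.count S val : Int)]) ([] : List Int)
        = S.map f := by
      simpa using PySem.List.foldl_append_singleton_eq_map (f := f) (l := S) (acc := [])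
    -- max? is some
    have hmapne : S.map f ≠ [] := by simpa using hne
    obtain ⟨M, hmax⟩ : ∃ M, PySem.List.max? (S.map f) (fun x => x) = some M := by
      cases hM : PySem.List.max? (S.map f) (fun x => x) with
      | none => exact absurd (by rwa [PySem.List.max?_eq_none_iff] at hM) hmapne
      | some M => exact ⟨M, rfl⟩
    have hMmem : M ∈ S.map f := PySem.List.max?_mem hmax
    have hMub : ∀ y ∈ S.map f, y ≤ M := by
      intro y hy; simpa using PySem.List.max?_isMax hmax y hy
    -- valores = S.filter (f · == M)
    have hval : (PySem.List.enumerate (S.map f) 0).foldl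
        (fun acc p => if p.2 == M then acc ++ [PySem.List.pyGetD S p.1 0] else acc) ([] : List Int)
        = S.filter (fun x => f x == M) := by
      rw [PySem.List.foldl_append_if]
      rw [List.nil_append]
      exact pvEnumFilter f M S S 0 (fun k hk => by
        have : ((0 : Int) + k) = (k : Int) := by ring
        rw [this, PySem.List.pyGetD_natCast])
    obtain ⟨x0, hx0S, hx0M⟩ : ∃ x ∈ S, f x = M := by
      obtain ⟨x, hxS, hxM⟩ := List.mem_map.mp hMmem; exact ⟨x, hxS, hxM⟩
    have hx0filt : x0 ∈ S.filter (fun x => f x == M) :=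
      List.mem_filter.mpr ⟨hx0S, by simp [hx0M]⟩
    have hfiltne : S.filter (fun x => f x == M) ≠ [] := fun h => by simp [h] at hx0filt
    obtain ⟨a, hmin⟩ : ∃ a, PySem.List.min? (S.filter (fun x => f x == M)) (fun x => x) = some a := by
      cases hm : PySem.List.min? (S.filter (fun x => f x == M)) (fun x => x) with
      | none => exact absurd (by rwa [PySem.List.min?_eq_none_iff] at hm) hfiltne
      | some a => exact ⟨a, rfl⟩
    have hamem := PySem.List.min?_mem hmin
    have halb : ∀ y ∈ S.filter (fun x => f x == M), a ≤ y := by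
      intro y hy; simpa using PySem.List.min?_isMin hmin y hy
    -- A's value is a
    have hA : NumMasPopular S cantidad = a := by
      simp only [NumMasPopular, if_neg h5, hcant, hmax, hval, hmin]
    -- B side
    have hcounter : S.foldl (fun d x => d.insert x (d.getD x 0 + 1)) (PySem.Dict.empty : PySem.Dict Int Int)
        = PySem.Dict.counter S := PySem.Dict.foldl_insert_getD_add_one_eq_counter S
    have hitems : (PySem.Dict.counter S).items
        = (PySem.Set.ofList S).map (fun k => (k, (S.count k : Int))) := PySem.Dict.items_counter S
    obtain ⟨hrmem, -, hrub⟩ := pvFoldBest ((PySem.Dict.counter S).items) (0, 0)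
    set r : Int × Int := ((PySem.Dict.counter S).items).foldl pvStep (0, 0) with hr
    have hB : NumMasPopular_alt S cantidad = r.2 := by
      simp only [NumMasPopular_alt, if_neg h5, hcounter, hr]
      rfl
    have hmemL : ∀ v ∈ S, (v, (S.count v : Int)) ∈ (PySem.Dict.counter S).items := by
      intro v hv
      rw [hitems]
      exact List.mem_map_of_mem ((PySem.Set.mem_ofList _ _).mpr hv)
    -- r is (count v0, v0) for some v0 ∈ S
    have hrL : r ∈ ((PySem.Dict.counter S).items).map (fun p => (p.2, p.1)) := by
      rcases hrmem with h0 | h0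
      · exfalso
        have hub := hrub _ (hmemL x0 hx0S)
        unfold pvLe at hub
        rw [h0] at hub
        dsimp only at hub
        have hc : 0 < S.count x0 := List.count_pos_iff.mpr hx0S
        omega
      · exact h0
    obtain ⟨p0, hp0L, hp0r⟩ := List.mem_map.mp hrL
    rw [hitems] at hp0L
    obtain ⟨v0, hv0S', hv0p⟩ := List.mem_map.mp hp0L
    have hv0S : v0 ∈ S := (PySem.Set.mem_ofList _ _).mp hv0S'
    have hr1 : r.1 = (S.count v0 : Int) := by rw [← hp0r, ← hv0p]
    have hr2 : r.2 = v0 := by rw [← hp0r, ← hv0p]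
    have hcount_le : ∀ v ∈ S, (S.count v : Int) ≤ r.1 := by
      intro v hv
      have hub := hrub _ (hmemL v hv)
      unfold pvLe at hub
      dsimp only at hub
      omega
    have hfcount : ∀ v, f v = (S.count v : Int) := by
      intro v; simp [hf, PySem.List.count_eq]
    -- M = r.1
    have hMle : M ≤ r.1 := by
      have h := hcount_le x0 hx0S
      rw [← hfcount x0, hx0M] at h
      exact h
    have hleM : r.1 ≤ M := by
      have hmem : f v0 ∈ S.map f := List.mem_map_of_mem hv0S
      have h := hMub _ hmem
      rw [hfcount v0, ← hr1] at h
      exact h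
    have hMr1 : M = r.1 := le_antisymm hMle hleM
    -- a = r.2
    have haS : a ∈ S := (List.mem_filter.mp hamem).1
    have haM : f a = M := by
      have h := (List.mem_filter.mp hamem).2
      simpa using h
    have hr2a : r.2 ≤ a := by
      have hub := hrub _ (hmemL a haS)
      unfold pvLe at hub
      dsimp only at hub
      have hca : (S.count a : Int) = r.1 := by rw [← hfcount a, haM, hMr1]
      omega
    have har2 : a ≤ r.2 := by
      have hv0filt : v0 ∈ S.filter (fun x => f x == M) := by
        refine List.mem_filter.mpr ⟨hv0S, ?_⟩
        simp only [beq_iff_eq]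
        rw [hfcount v0, ← hr1, hMr1]
      have h := halb v0 hv0filt
      rw [hr2]
      exact h
    rw [hA, hB]
    omega

-- ===== VERDICT (by name: the statement is the Claim_ definition above) =====
theorem NumMasPopular_spec : Claim_equal_NumMasPopular := by
  intro S cantidad _ hpre
  unfold Spec_NumMasPopular
  exact NumMasPopular_main S cantidad hpre
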